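-- pv_equiv track=rewrite | github.com/mrsxman/asadshakx_sh | massiv.py | ikki_marta_uchraganlarini_ochir
-- ===== SOURCE A (Python) =====
-- def ikki_marta_uchraganlarini_ochir(massiv):
--     natija_massiv = []
--     qatnashganlar = set()
--
--     for element in massiv:
--         if massiv.count(element) < 3:
--             natija_massiv.append(element)
--             qatnashganlar.add(element)
--
--     # 2 marta uchraganlarini o'chirish
--     for element in qatnashganlar:
--         natija_massiv.remove(element)
--
--     return natija_massiv
-- ===== SOURCE B (Python) =====
-- def ikki_marta_uchraganlarini_ochir(massiv):
--     cnt = {}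
--     for x in massiv:
--         cnt[x] = cnt.get(x, 0) + 1
--     seen = {}
--     natija = []
--     for x in massiv:
--         seen[x] = seen.get(x, 0) + 1
--         if cnt[x] == 2 and seen[x] == 2:
--             natija.append(x)
--     return natija
-- ===== Notes on version B (the rewrite author's own statement) =====
-- stated objective: faster
-- what changed: Replaces A's per-element massiv.count scan plus build-then-remove-one-of-each pass with two linear dict passes: one counting pass, then one pass that emits an element exactly when its total count is 2 and this is its second occurrence.
import Mathlib
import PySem

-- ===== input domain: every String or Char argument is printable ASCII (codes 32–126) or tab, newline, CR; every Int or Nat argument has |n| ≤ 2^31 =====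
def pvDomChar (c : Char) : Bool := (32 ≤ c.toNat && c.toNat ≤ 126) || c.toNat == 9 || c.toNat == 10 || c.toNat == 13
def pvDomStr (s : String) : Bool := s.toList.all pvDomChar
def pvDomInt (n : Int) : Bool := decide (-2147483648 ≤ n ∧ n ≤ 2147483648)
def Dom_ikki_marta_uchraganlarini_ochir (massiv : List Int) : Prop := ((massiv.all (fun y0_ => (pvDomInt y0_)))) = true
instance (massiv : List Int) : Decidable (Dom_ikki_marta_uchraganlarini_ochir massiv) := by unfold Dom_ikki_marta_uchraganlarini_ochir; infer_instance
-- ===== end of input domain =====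

-- B replaces A's quadratic count-scan + remove-one-of-each pass by two linear dict passes
-- (count everything, then keep each second occurrence of a value counted exactly twice).

-- ===== PORT A =====
-- 'natija_massiv.remove(element)' : list.remove; each removed element is in the list here,
-- so the .getD fallback for the ValueError case is never taken.
def pvRemoveStep (acc : List Int) (e : Int) : List Int :=
  (PySem.List.remove? acc e).getD acc

def ikki_marta_uchraganlarini_ochir (massiv : List Int) : List Int :=
  -- first loop: build natija_massiv and the set qatnashganlar together
  let st := massiv.foldl
    (fun (st : List Int × PySem.Set Int) element =>
      if PySem.List.count massiv element < 3 then
        (st.1 ++ [element], PySem.Set.add st.2 element)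
      else st)
    ([], PySem.Set.empty)
  -- second loop: 'for element in qatnashganlar: natija_massiv.remove(element)';
  -- Python iterates the set in hash order (not modelled); removals of the distinct
  -- set elements commute, so folding the Set's element list is value-exact.
  st.2.foldl pvRemoveStep st.1

-- ===== PORT B =====
def ikki_marta_uchraganlarini_ochir_alt (massiv : List Int) : List Int :=
  let cnt := massiv.foldl
    (fun (d : PySem.Dict Int Int) x => d.insert x (d.getD x 0 + 1)) PySem.Dict.empty
  -- 'cnt[x]' : x is an element of massiv, so the key is present and getD is exact.
  let st := massiv.foldl
    (fun (st : PySem.Dict Int Int × List Int) x =>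
      let seen := st.1.insert x (st.1.getD x 0 + 1)
      if cnt.getD x 0 = 2 ∧ seen.getD x 0 = 2 then (seen, st.2 ++ [x])
      else (seen, st.2))
    (PySem.Dict.empty, [])
  st.2

-- ===== PRECONDITION & SPEC =====
def Spec_ikki_marta_uchraganlarini_ochir (massiv : List Int) (out : List Int) : Prop := out = ikki_marta_uchraganlarini_ochir_alt massiv
instance (massiv : List Int) (out : List Int) : Decidable (Spec_ikki_marta_uchraganlarini_ochir massiv out) := by unfold Spec_ikki_marta_uchraganlarini_ochir; infer_instance

-- ===== CLAIM (what is proved, stated in full; the proofs are below) =====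
def Claim_equal_ikki_marta_uchraganlarini_ochir : Prop := ∀ (massiv : List Int), Dom_ikki_marta_uchraganlarini_ochir massiv → Spec_ikki_marta_uchraganlarini_ochir massiv (ikki_marta_uchraganlarini_ochir massiv)

-- ===== LEMMAS AND PROOFS =====

-- common specification: walking massiv left to right, emit x when its total count is 2
-- and it has already been seen (i.e. this is its second occurrence)
def pvSpecGo (all : List Int) : List Int → List Int → List Int
  | _pre, [] => []
  | pre, x :: r =>
    if all.count x = 2 ∧ x ∈ pre then x :: pvSpecGo all (pre ++ [x]) r
    else pvSpecGo all (pre ++ [x]) r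

-- the result of removing (first occurrence of) each element of d once, in order
def pvDropFirsts : List Int → List Int → List Int
  | _d, [] => []
  | d, x :: r => if x ∈ d then pvDropFirsts (d.erase x) r else x :: pvDropFirsts d r

lemma pvFoldlRemove_nil (d : List Int) : d.foldl pvRemoveStep [] = [] := by
  induction d with
  | nil => rfl
  | cons e d ih => simpa [pvRemoveStep, PySem.List.remove?] using ih

lemma pvFoldlRemove_cons_not_mem (d : List Int) (y : Int) (l : List Int) (h : y ∉ d) :
    d.foldl pvRemoveStep (y :: l) = y :: d.foldl pvRemoveStep l := by
  induction d generalizing l with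
  | nil => rfl
  | cons e d ih =>
    have hey : y ≠ e := by intro he; exact h (by simp [he])
    have hstep : pvRemoveStep (y :: l) e = y :: pvRemoveStep l e := by
      rw [pvRemoveStep, pvRemoveStep, PySem.List.remove?_cons_of_ne l hey]
      cases PySem.List.remove? l e <;> simp
    simp only [List.foldl_cons, hstep]
    exact ih _ (fun hm => h (by simp [hm]))

lemma pvFoldlRemove_eq_dropFirsts (l : List Int) :
    ∀ d : List Int, d.Nodup → d.foldl pvRemoveStep l = pvDropFirsts d l := by
  induction l with
  | nil => intro d _; simp [pvFoldlRemove_nil, pvDropFirsts]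
  | cons y l ih =>
    intro d hd
    by_cases hy : y ∈ d
    · obtain ⟨d1, d2, rfl⟩ := List.append_of_mem hy
      have hnd1 : y ∉ d1 := by
        intro h1
        exact List.disjoint_of_nodup_append hd h1 (by simp)
      have herase : (d1 ++ y :: d2).erase y = d1 ++ d2 := by
        rw [List.erase_append_right _ hnd1, List.erase_cons_head]
      have hstep : (d1 ++ y :: d2).foldl pvRemoveStep (y :: l)
          = (d1 ++ d2).foldl pvRemoveStep l := by
        rw [List.foldl_append, pvFoldlRemove_cons_not_mem d1 y l hnd1]
        simp only [List.foldl_cons, pvRemoveStep, PySem.List.remove?_cons_self, Option.getD_some]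
        rw [← List.foldl_append]
      have hnd' : (d1 ++ d2).Nodup := by
        have := hd.sublist (l₁ := d1 ++ d2) (by simp)
        exact this
      rw [hstep, ih _ hnd', pvDropFirsts, if_pos hy, herase]
    · rw [pvFoldlRemove_cons_not_mem d y l hy, pvDropFirsts, if_neg hy, ih d hd]

-- A's second phase on the filtered list is the second-occurrence spec over massiv
lemma pvDropFirsts_filter_eq_specGo (all : List Int) :
    ∀ (rest pre d : List Int), d.Nodup →
      (∀ v ∈ rest, all.count v < 3 → (v ∈ d ↔ v ∉ pre)) →
      (∀ v, all.count v = pre.count v + rest.count v) →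
      pvDropFirsts d (rest.filter (fun e => decide (all.count e < 3))) = pvSpecGo all pre rest := by
  intro rest
  induction rest with
  | nil => intro pre d _ _ _; simp [pvDropFirsts, pvSpecGo]
  | cons x r ih =>
    intro pre d hnd hinv hcnt
    have hcnt' : ∀ v, all.count v = (pre ++ [x]).count v + r.count v := by
      intro v; have := hcnt v; simp [List.count_append, List.count_cons] at this ⊢; omega
    by_cases hp : all.count x < 3
    · rw [List.filter_cons_of_pos (by simpa using hp)]
      have hxmem : x ∈ d ↔ x ∉ pre := hinv x (by simp) hp
      by_cases hxd : x ∈ d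
      · have hxpre : x ∉ pre := hxmem.mp hxd
        rw [pvDropFirsts, if_pos hxd, pvSpecGo, if_neg (by tauto)]
        refine ih (pre ++ [x]) (d.erase x) (hnd.erase x) ?_ hcnt'
        intro v hv hv3
        by_cases hvx : v = x
        · subst hvx
          exact ⟨fun hmem => absurd hmem hnd.not_mem_erase,
                 fun hnp => absurd (by simp) hnp⟩
        · rw [List.mem_erase_of_ne hvx]
          rw [hinv v (by simp [hv]) hv3]
          simp [List.mem_append, hvx]
      · have hxpre : x ∈ pre := by by_contra hnp; exact hxd (hxmem.mpr hnp)
        have hc2 : all.count x = 2 := by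
          have h1 : 1 ≤ pre.count x := List.count_pos_iff.mpr hxpre
          have h2 : 1 ≤ (x :: r).count x := by simp [List.count_cons]
          have := hcnt x; omega
        rw [pvDropFirsts, if_neg hxd, pvSpecGo, if_pos ⟨hc2, hxpre⟩]
        congr 1
        refine ih (pre ++ [x]) d hnd ?_ hcnt'
        intro v hv hv3
        by_cases hvx : v = x
        · subst hvx; simp [hxd]
        · rw [hinv v (by simp [hv]) hv3]; simp [hvx]
    · rw [List.filter_cons_of_neg (by simpa using hp)]
      rw [pvSpecGo, if_neg (by intro ⟨h2, _⟩; omega)]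
      refine ih (pre ++ [x]) d hnd ?_ hcnt'
      intro v hv hv3
      by_cases hvx : v = x
      · subst hvx; omega
      · rw [hinv v (by simp [hv]) hv3]; simp [hvx]

-- A's first loop builds exactly (filter, set-of-filter)
lemma pvPhase1 (all l : List Int) (n : List Int) (q : PySem.Set Int) :
    l.foldl
        (fun (st : List Int × PySem.Set Int) element =>
          if PySem.List.count all element < 3 then
            (st.1 ++ [element], PySem.Set.add st.2 element)
          else st)
        (n, q)
      = (n ++ l.filter (fun e => decide (all.count e < 3)),
         PySem.Set.update q (l.filter (fun e => decide (all.count e < 3)))) := by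
  induction l generalizing n q with
  | nil => simp [PySem.Set.update]
  | cons x l ih =>
    by_cases hp : all.count x < 3
    · rw [List.foldl_cons, if_pos (by simpa [PySem.List.count_eq] using hp),
        List.filter_cons_of_pos (by simpa using hp)]
      rw [ih]
      simp [PySem.Set.update_cons]
    · rw [List.foldl_cons, if_neg (by simpa [PySem.List.count_eq] using hp),
        List.filter_cons_of_neg (by simpa using hp)]
      exact ih n q

theorem pvA_eq_spec (massiv : List Int) :
    ikki_marta_uchraganlarini_ochir massiv = pvSpecGo massiv [] massiv := by
  unfold ikki_marta_uchraganlarini_ochir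
  rw [pvPhase1 massiv massiv [] PySem.Set.empty]
  simp only [List.nil_append]
  set f := fun e : Int => decide (massiv.count e < 3) with hf
  have hq : PySem.Set.update PySem.Set.empty (massiv.filter f) = PySem.Set.ofList (massiv.filter f) := by
    rfl
  rw [hq, pvFoldlRemove_eq_dropFirsts _ _ (PySem.Set.nodup_ofList _)]
  have : pvDropFirsts (PySem.Set.ofList (massiv.filter f)) (massiv.filter f)
      = pvSpecGo massiv [] massiv := by
    refine pvDropFirsts_filter_eq_specGo massiv massiv [] _ (PySem.Set.nodup_ofList _) ?_ ?_
    · intro v hv hv3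
      simp [PySem.Set.mem_ofList, hf, List.mem_filter, hv, hv3]
    · intro v; simp
  -- dropFirsts recurses on the filtered list; rewrite via the general lemma
  exact this

-- B's second loop equals the spec
lemma pvB_loop_eq (all : List Int) :
    ∀ (rest : List Int) (seen : PySem.Dict Int Int) (pre acc : List Int),
      (∀ v, seen.getD v 0 = (pre.count v : Int)) →
      (∀ v, all.count v = pre.count v + rest.count v) →
      (rest.foldl
        (fun (st : PySem.Dict Int Int × List Int) x =>
          let seen := st.1.insert x (st.1.getD x 0 + 1)
          if (all.count x : Int) = 2 ∧ seen.getD x 0 = 2 then (seen, st.2 ++ [x])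
          else (seen, st.2))
        (seen, acc)).2 = acc ++ pvSpecGo all pre rest := by
  intro rest
  induction rest with
  | nil => intro seen pre acc _ _; simp [pvSpecGo]
  | cons x r ih =>
    intro seen pre acc hs hcnt
    have hgx : (seen.insert x (seen.getD x 0 + 1)).getD x 0 = (pre.count x : Int) + 1 := by
      rw [PySem.Dict.getD_insert_self, hs]
    have hs' : ∀ v, (seen.insert x (seen.getD x 0 + 1)).getD v 0 = ((pre ++ [x]).count v : Int) := by
      intro v
      by_cases hvx : v = x
      · subst hvx; rw [hgx]; simp [List.count_append]
      · rw [PySem.Dict.getD_insert]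
        rw [if_neg hvx, hs v]
        have hxv : ¬ (x = v) := fun h => hvx h.symm
        simp [List.count_append, hxv]
    have hcnt' : ∀ v, all.count v = (pre ++ [x]).count v + r.count v := by
      intro v; have := hcnt v; simp [List.count_append, List.count_cons] at this ⊢; omega
    have hcond : ((all.count x : Int) = 2 ∧ (seen.insert x (seen.getD x 0 + 1)).getD x 0 = 2)
        ↔ (all.count x = 2 ∧ x ∈ pre) := by
      rw [hgx]
      constructor
      · rintro ⟨h2, hp⟩
        have h2' : all.count x = 2 := by exact_mod_cast h2
        have : pre.count x = 1 := by omega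
        exact ⟨h2', List.count_pos_iff.mp (by omega)⟩
      · rintro ⟨h2, hp⟩
        have h1 : 1 ≤ pre.count x := List.count_pos_iff.mpr hp
        have h2r : 1 ≤ (x :: r).count x := by simp [List.count_cons]
        have := hcnt x
        have hpc : pre.count x = 1 := by omega
        exact ⟨by exact_mod_cast h2, by rw [hpc]; norm_num⟩
    by_cases hc : all.count x = 2 ∧ x ∈ pre
    · rw [List.foldl_cons]
      simp only []
      rw [if_pos (hcond.mpr hc)]
      rw [ih _ _ _ hs' hcnt', pvSpecGo, if_pos hc]
      simp
    · rw [List.foldl_cons]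
      simp only []
      rw [if_neg (fun h => hc (hcond.mp h))]
      rw [ih _ _ _ hs' hcnt', pvSpecGo, if_neg hc]

theorem pvB_eq_spec (massiv : List Int) :
    ikki_marta_uchraganlarini_ochir_alt massiv = pvSpecGo massiv [] massiv := by
  unfold ikki_marta_uchraganlarini_ochir_alt
  have hcnt : ∀ x, (massiv.foldl
      (fun (d : PySem.Dict Int Int) x => d.insert x (d.getD x 0 + 1)) PySem.Dict.empty).getD x 0
      = (massiv.count x : Int) := by
    intro x
    rw [PySem.Dict.foldl_insert_getD_add_one_eq_counter, PySem.Dict.getD_counter]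
  simp only [hcnt]
  simpa using pvB_loop_eq massiv massiv PySem.Dict.empty [] []
    (by intro v; simp [PySem.Dict.getD_empty]) (by intro v; simp)

-- ===== VERDICT (by name: the statement is the Claim_ definition above) =====
theorem ikki_marta_uchraganlarini_ochir_spec : Claim_equal_ikki_marta_uchraganlarini_ochir := by
  intro massiv _
  unfold Spec_ikki_marta_uchraganlarini_ochir
  rw [pvA_eq_spec, pvB_eq_spec]
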